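-- pv_equiv track=rewrite | github.com/ZackAlatrash/Code-Chunker | trash/build_chunks_v3.py | generate_qa_terms
-- ===== SOURCE A (Python) =====
-- def generate_qa_terms(code: str, language: str) -> str:
--     """Generate QA terms using heuristics."""
--     terms = set()
--     lines = code.split('\n')
--
--     for line in lines:
--         line_lower = line.lower()
--
--         # HTTP status codes
--         if 'status' in line_lower and any(code in line for code in ['200', '201', '400', '401', '403', '404', '500']):
--             terms.update(['200', '201', '400', '401', '403', '404', '500'])
--
--         # HTTP methods
--         if any(method in line_lower for method in ['get', 'post', 'put', 'delete', 'patch']):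
--             terms.update(['GET', 'POST', 'PUT', 'DELETE', 'PATCH'])
--
--         # Exceptions
--         if language == 'python' and any(exc in line for exc in ['Exception', 'Error', 'ValueError', 'TypeError']):
--             terms.update(['Exception', 'Error', 'ValueError', 'TypeError'])
--
--         # Framework terms
--         if 'fastapi' in line_lower:
--             terms.add('FastAPI')
--         if 'django' in line_lower:
--             terms.add('Django')
--         if 'flask' in line_lower:
--             terms.add('Flask')
--         if 'react' in line_lower:
--             terms.add('React')
--         if 'vue' in line_lower:
--             terms.add('Vue')
--
--     return ', '.join(sorted(terms)[:12])  # Limit to 12 terms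
-- ===== SOURCE B (Python) =====
-- def generate_qa_terms(code: str, language: str) -> str:
--     """Generate QA terms using heuristics (whole-text scans; one line loop only for status codes)."""
--     lc = code.lower()
--     terms = set()
--
--     if any(m in lc for m in ['get', 'post', 'put', 'delete', 'patch']):
--         terms.update(['GET', 'POST', 'PUT', 'DELETE', 'PATCH'])
--
--     if language == 'python' and any(exc in code for exc in ['Exception', 'Error', 'ValueError', 'TypeError']):
--         terms.update(['Exception', 'Error', 'ValueError', 'TypeError'])
--
--     for term, key in [('FastAPI', 'fastapi'), ('Django', 'django'),
--                       ('Flask', 'flask'), ('React', 'react'), ('Vue', 'vue')]: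
--         if key in lc:
--             terms.add(term)
--
--     if any('status' in line.lower()
--            and any(c in line for c in ['200', '201', '400', '401', '403', '404', '500'])
--            for line in code.split('\n')):
--         terms.update(['200', '201', '400', '401', '403', '404', '500'])
--
--     return ', '.join(sorted(terms)[:12])
-- ===== Notes on version B (the rewrite author's own statement) =====
-- stated objective: alternative
-- what changed: The single per-line accumulating pass with every rule inside is replaced by independent whole-text substring tests (on code.lower() for the case-insensitive rules, raw code for exceptions); only the status-code rule, which needs 'status' and a numeric code on the same line, keeps a per-line scan, and the set is assembled from these flags.
import Mathlib
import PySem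

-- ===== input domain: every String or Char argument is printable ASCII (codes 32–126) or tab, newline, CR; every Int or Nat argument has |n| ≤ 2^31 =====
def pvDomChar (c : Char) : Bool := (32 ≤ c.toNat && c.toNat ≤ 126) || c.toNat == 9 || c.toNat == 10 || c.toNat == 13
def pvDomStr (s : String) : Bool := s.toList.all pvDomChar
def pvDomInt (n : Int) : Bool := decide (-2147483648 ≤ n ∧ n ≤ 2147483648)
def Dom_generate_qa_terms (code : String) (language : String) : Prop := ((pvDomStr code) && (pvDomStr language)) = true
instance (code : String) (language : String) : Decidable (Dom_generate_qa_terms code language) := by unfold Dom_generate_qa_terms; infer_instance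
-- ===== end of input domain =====

-- B replaces A's single accumulating per-line pass by independent whole-text substring tests
-- (only the status-code rule keeps a per-line scan); same return value, objective: alternative.

-- shared literal constants (the lists written in both Python sources)
def qaStatusCodes : List String := ["200", "201", "400", "401", "403", "404", "500"]
def qaMethodsLower : List String := ["get", "post", "put", "delete", "patch"]
def qaMethodsUpper : List String := ["GET", "POST", "PUT", "DELETE", "PATCH"]
def qaExceptions : List String := ["Exception", "Error", "ValueError", "TypeError"]
def qaFrameworks : List (String × String) :=
  [("FastAPI", "fastapi"), ("Django", "django"), ("Flask", "flask"), ("React", "react"), ("Vue", "vue")]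

-- ===== PORT A =====
-- one fold over code.split('\n'), every rule tested per line against the loop's set
-- (split? "\n" is never none since the separator is nonempty; getD [] is exact)
def generate_qa_terms (code : String) (language : String) : String :=
  let lines := (PySem.Str.split? code "\n").getD []
  let terms : PySem.Set String :=
    lines.foldl (fun terms line =>
      let line_lower := PySem.Str.lower line
      let terms := if PySem.Str.isIn "status" line_lower
                      && qaStatusCodes.any (fun c => PySem.Str.isIn c line)
                   then PySem.Set.update terms qaStatusCodes else terms
      let terms := if qaMethodsLower.any (fun m => PySem.Str.isIn m line_lower)
                   then PySem.Set.update terms qaMethodsUpper else terms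
      let terms := if language == "python"
                      && qaExceptions.any (fun e => PySem.Str.isIn e line)
                   then PySem.Set.update terms qaExceptions else terms
      let terms := if PySem.Str.isIn "fastapi" line_lower then PySem.Set.add terms "FastAPI" else terms
      let terms := if PySem.Str.isIn "django" line_lower then PySem.Set.add terms "Django" else terms
      let terms := if PySem.Str.isIn "flask" line_lower then PySem.Set.add terms "Flask" else terms
      let terms := if PySem.Str.isIn "react" line_lower then PySem.Set.add terms "React" else terms
      let terms := if PySem.Str.isIn "vue" line_lower then PySem.Set.add terms "Vue" else terms
      terms) PySem.Set.empty
  PySem.Str.join ", " (PySem.List.slice (PySem.List.sorted terms (fun t => t) false) none (some 12))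

-- ===== PORT B =====
-- whole-text membership tests (lc for the case-insensitive rules, raw code for exceptions),
-- a per-line scan only for the status rule
def generate_qa_terms_alt (code : String) (language : String) : String :=
  let lc := PySem.Str.lower code
  let terms : PySem.Set String := PySem.Set.empty
  let terms := if qaMethodsLower.any (fun m => PySem.Str.isIn m lc)
               then PySem.Set.update terms qaMethodsUpper else terms
  let terms := if language == "python" && qaExceptions.any (fun e => PySem.Str.isIn e code)
               then PySem.Set.update terms qaExceptions else terms
  let terms := qaFrameworks.foldl (fun terms p =>
      if PySem.Str.isIn p.2 lc then PySem.Set.add terms p.1 else terms) terms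
  let terms := if ((PySem.Str.split? code "\n").getD []).any (fun line =>
                    PySem.Str.isIn "status" (PySem.Str.lower line)
                    && qaStatusCodes.any (fun c => PySem.Str.isIn c line))
               then PySem.Set.update terms qaStatusCodes else terms
  PySem.Str.join ", " (PySem.List.slice (PySem.List.sorted terms (fun t => t) false) none (some 12))

-- ===== PRECONDITION & SPEC =====
def Spec_generate_qa_terms (code : String) (language : String) (out : String) : Prop := out = generate_qa_terms_alt code language
instance (code : String) (language : String) (out : String) : Decidable (Spec_generate_qa_terms code language out) := by unfold Spec_generate_qa_terms; infer_instance

-- ===== CLAIM (what is proved, stated in full; the proofs are below) =====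
def Claim_equal_generate_qa_terms : Prop := ∀ (code : String) (language : String), Dom_generate_qa_terms code language → Spec_generate_qa_terms code language (generate_qa_terms code language)

-- ===== LEMMAS AND PROOFS =====

-- structural form of Python's split('\n') on char lists
def splitNl : List Char → List (List Char)
  | [] => [[]]
  | a :: cs => if a = '\n' then [] :: splitNl cs else (splitNl cs).modifyHead (a :: ·)

lemma splitNl_ne_nil (cs : List Char) : splitNl cs ≠ [] := by
  induction cs with
  | nil => simp [splitNl]
  | cons a cs ih =>
    simp only [splitNl]
    split_ifs
    · simp
    · cases h : splitNl cs with
      | nil => exact absurd h ih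
      | cons x xs => simp [List.modifyHead]

-- '\n'.join, structurally
def joinNl : List (List Char) → List Char
  | [] => []
  | [x] => x
  | x :: y :: ys => x ++ '\n' :: joinNl (y :: ys)

lemma joinNl_splitNl (cs : List Char) : joinNl (splitNl cs) = cs := by
  induction cs with
  | nil => rfl
  | cons a cs ih =>
    simp only [splitNl]
    split_ifs with h
    · subst h
      cases hs : splitNl cs with
      | nil => exact absurd hs (splitNl_ne_nil cs)
      | cons x xs => rw [hs] at ih; simpa [joinNl] using ih
    · cases hs : splitNl cs with
      | nil => exact absurd hs (splitNl_ne_nil cs)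
      | cons x xs =>
        rw [hs] at ih
        cases xs <;> simpa [List.modifyHead, joinNl] using ih

-- a needle without '\n' is prefix of xs ++ '\n' :: ys only inside xs
lemma prefix_of_prefix_append_nl {sub xs ys : List Char} (hn : '\n' ∉ sub)
    (h : sub <+: xs ++ '\n' :: ys) : sub <+: xs := by
  induction sub generalizing xs with
  | nil => exact List.nil_prefix
  | cons a sub ih =>
    cases xs with
    | nil =>
      rcases List.cons_prefix_cons.mp h with ⟨rfl, -⟩
      exact absurd (List.mem_cons_self) hn
    | cons x xs =>
      rcases List.cons_prefix_cons.mp h with ⟨rfl, h2⟩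
      exact List.cons_prefix_cons.mpr ⟨rfl, ih (fun hm => hn (List.mem_cons_of_mem _ hm)) h2⟩

-- a needle without '\n' is infix of xs ++ '\n' :: ys iff it is infix of a side
lemma infix_append_nl {sub : List Char} (hn : '\n' ∉ sub) (xs ys : List Char) :
    sub <:+: xs ++ '\n' :: ys ↔ sub <:+: xs ∨ sub <:+: ys := by
  constructor
  · intro h
    induction xs with
    | nil =>
      rcases List.infix_cons_iff.mp h with h1 | h2
      · cases sub with
        | nil => exact Or.inl (List.nil_infix)
        | cons a sub =>
          rcases List.cons_prefix_cons.mp h1 with ⟨rfl, -⟩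
          exact absurd (List.mem_cons_self) hn
      · exact Or.inr h2
    | cons x xs ih =>
      rcases List.infix_cons_iff.mp h with h1 | h2
      · exact Or.inl (prefix_of_prefix_append_nl hn (by simpa using h1)).isInfix
      · rcases ih h2 with h3 | h3
        · exact Or.inl (h3.trans (List.suffix_cons x xs).isInfix)
        · exact Or.inr h3
  · rintro (h | h)
    · exact h.trans ⟨[], '\n' :: ys, by simp⟩
    · exact h.trans ⟨xs ++ ['\n'], [], by simp⟩

lemma infix_joinNl {sub : List Char} (hn : '\n' ∉ sub) (x : List Char) (xs : List (List Char)) :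
    sub <:+: joinNl (x :: xs) ↔ ∃ l ∈ x :: xs, sub <:+: l := by
  induction xs generalizing x with
  | nil => simp [joinNl]
  | cons y ys ih =>
    rw [show joinNl (x :: y :: ys) = x ++ '\n' :: joinNl (y :: ys) from rfl,
        infix_append_nl hn, ih]
    simp

-- the central fact: a newline-free needle is infix of cs iff it is infix of some line
lemma infix_iff_exists_line {sub : List Char} (hn : '\n' ∉ sub) (cs : List Char) :
    sub <:+: cs ↔ ∃ l ∈ splitNl cs, sub <:+: l := by
  conv_lhs => rw [← joinNl_splitNl cs]
  cases hs : splitNl cs with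
  | nil => exact absurd hs (splitNl_ne_nil cs)
  | cons x xs => exact infix_joinNl hn x xs

-- PySem's fuel-based splitOn on separator "\n" is splitNl
lemma splitOn_go_eq_splitNl (cs : List Char) (fuel : Nat) (hf : cs.length < fuel)
    (cur : List Char) (acc : List (List Char)) :
    PySem.Chars.splitOn.go ['\n'] fuel cs cur acc
      = acc.reverse ++ (splitNl cs).modifyHead (cur.reverse ++ ·) := by
  induction fuel generalizing cs cur acc with
  | zero => omega
  | succ fuel ih =>
    cases cs with
    | nil => simp [PySem.Chars.splitOn.go, splitNl, List.modifyHead]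
    | cons a cs =>
      by_cases ha : a = '\n'
      · subst ha
        rw [show PySem.Chars.splitOn.go ['\n'] (fuel + 1) ('\n' :: cs) cur acc
              = PySem.Chars.splitOn.go ['\n'] fuel cs [] (cur.reverse :: acc) by
            simp [PySem.Chars.splitOn.go, List.isPrefixOf]]
        rw [ih cs (by simpa using Nat.lt_of_succ_lt_succ hf) [] (cur.reverse :: acc)]
        cases hs : splitNl cs with
        | nil => exact absurd hs (splitNl_ne_nil cs)
        | cons x xs => simp [splitNl, List.modifyHead, hs]
      · rw [show PySem.Chars.splitOn.go ['\n'] (fuel + 1) (a :: cs) cur acc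
              = PySem.Chars.splitOn.go ['\n'] fuel cs (a :: cur) acc by
            simp [PySem.Chars.splitOn.go, List.isPrefixOf, Ne.symm ha]]
        rw [ih cs (by simpa using Nat.lt_of_succ_lt_succ hf) (a :: cur) acc]
        cases hs : splitNl cs with
        | nil => exact absurd hs (splitNl_ne_nil cs)
        | cons x xs => simp [splitNl, ha, List.modifyHead, hs]

lemma splitOn_eq_splitNl (cs : List Char) :
    PySem.Chars.splitOn cs ['\n'] = splitNl cs := by
  rw [PySem.Chars.splitOn, splitOn_go_eq_splitNl cs (cs.length + 1) (by omega) [] []]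
  cases hs : splitNl cs with
  | nil => exact absurd hs (splitNl_ne_nil cs)
  | cons x xs => simp [List.modifyHead]

-- lower maps '\n' to '\n' and nothing else to '\n'
lemma lowerChar_eq_nl_iff (a : Char) : PySem.Chars.lowerChar a = '\n' ↔ a = '\n' := by
  unfold PySem.Chars.lowerChar
  split_ifs with h
  · constructor
    · intro hc
      exfalso
      have hb : 65 ≤ a.toNat ∧ a.toNat ≤ 90 := by
        simp [PySem.Chars.isupper] at h; exact ⟨h.1, h.2⟩
      have h2 := congrArg Char.toNat hc
      rw [Char.toNat_ofNat] at h2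
      have hv : (a.toNat + 32).isValidChar := Or.inl (by omega)
      rw [if_pos hv] at h2
      have h10 : ('\n').toNat = 10 := rfl
      omega
    · intro hc; subst hc; simp [PySem.Chars.isupper] at h
  · exact Iff.rfl

lemma splitNl_lower (cs : List Char) :
    splitNl (PySem.Chars.lower cs) = (splitNl cs).map (PySem.Chars.lower) := by
  induction cs with
  | nil => rfl
  | cons a cs ih =>
    simp only [PySem.Chars.lower, List.map_cons, splitNl]
    by_cases h : a = '\n'
    · rw [if_pos ((lowerChar_eq_nl_iff a).mpr h), if_pos h]
      simp only [List.map_cons]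
      rw [show List.map PySem.Chars.lowerChar cs = PySem.Chars.lower cs from rfl, ih]
      rfl
    · rw [if_neg (fun hc => h ((lowerChar_eq_nl_iff a).mp hc)), if_neg h]
      rw [show List.map PySem.Chars.lowerChar cs = PySem.Chars.lower cs from rfl, ih]
      cases hs : splitNl cs with
      | nil => exact absurd hs (splitNl_ne_nil cs)
      | cons x xs => simp [List.modifyHead, PySem.Chars.lower]

-- the list of lines, at String level
def qaLines (code : String) : List String := (PySem.Str.split? code "\n").getD []

lemma qaLines_eq (code : String) :
    qaLines code = (splitNl code.toList).map String.ofList := by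
  simp [qaLines, PySem.Str.split?, PySem.Chars.split?, splitOn_eq_splitNl,
        show ("\n").toList = ['\n'] from rfl]

-- a newline-free needle occurs in code iff it occurs in some line
lemma isIn_line_iff (sub code : String) (hn : '\n' ∉ sub.toList) :
    PySem.Str.isIn sub code = true ↔ ∃ l ∈ qaLines code, PySem.Str.isIn sub l = true := by
  rw [PySem.Str.isIn_iff_infix, infix_iff_exists_line hn code.toList, qaLines_eq]
  simp only [List.mem_map]
  constructor
  · rintro ⟨l, hl, hi⟩
    exact ⟨String.ofList l, ⟨l, hl, rfl⟩, by
      rw [PySem.Str.isIn_iff_infix, String.toList_ofList]; exact hi⟩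
  · rintro ⟨-, ⟨l, hl, rfl⟩, hi⟩
    rw [PySem.Str.isIn_iff_infix, String.toList_ofList] at hi
    exact ⟨l, hl, hi⟩

-- same, testing against the lower-cased text / lower-cased lines
lemma isIn_lower_line_iff (sub code : String) (hn : '\n' ∉ sub.toList) :
    PySem.Str.isIn sub (PySem.Str.lower code) = true
      ↔ ∃ l ∈ qaLines code, PySem.Str.isIn sub (PySem.Str.lower l) = true := by
  rw [PySem.Str.isIn_iff_infix, PySem.Str.toList_lower,
      infix_iff_exists_line hn (PySem.Chars.lower code.toList), splitNl_lower, qaLines_eq]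
  simp only [List.mem_map]
  constructor
  · rintro ⟨-, ⟨l, hl, rfl⟩, hi⟩
    exact ⟨String.ofList l, ⟨l, hl, rfl⟩, by
      rw [PySem.Str.isIn_iff_infix, PySem.Str.toList_lower, String.toList_ofList]; exact hi⟩
  · rintro ⟨-, ⟨l, hl, rfl⟩, hi⟩
    rw [PySem.Str.isIn_iff_infix, PySem.Str.toList_lower, String.toList_ofList] at hi
    exact ⟨PySem.Chars.lower l, ⟨l, hl, rfl⟩, hi⟩

-- the per-line conditions of A's loop body
def condStatus (line : String) : Bool :=
  PySem.Str.isIn "status" (PySem.Str.lower line)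
    && qaStatusCodes.any (fun c => PySem.Str.isIn c line)
def condMeth (line : String) : Bool :=
  qaMethodsLower.any (fun m => PySem.Str.isIn m (PySem.Str.lower line))
def condExc (language line : String) : Bool :=
  (language == "python") && qaExceptions.any (fun e => PySem.Str.isIn e line)

-- A's loop body, named
def stepA (language : String) (terms : PySem.Set String) (line : String) : PySem.Set String :=
  let line_lower := PySem.Str.lower line
  let terms := if PySem.Str.isIn "status" line_lower
                  && qaStatusCodes.any (fun c => PySem.Str.isIn c line)
               then PySem.Set.update terms qaStatusCodes else terms
  let terms := if qaMethodsLower.any (fun m => PySem.Str.isIn m line_lower)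
               then PySem.Set.update terms qaMethodsUpper else terms
  let terms := if language == "python"
                  && qaExceptions.any (fun e => PySem.Str.isIn e line)
               then PySem.Set.update terms qaExceptions else terms
  let terms := if PySem.Str.isIn "fastapi" line_lower then PySem.Set.add terms "FastAPI" else terms
  let terms := if PySem.Str.isIn "django" line_lower then PySem.Set.add terms "Django" else terms
  let terms := if PySem.Str.isIn "flask" line_lower then PySem.Set.add terms "Flask" else terms
  let terms := if PySem.Str.isIn "react" line_lower then PySem.Set.add terms "React" else terms
  let terms := if PySem.Str.isIn "vue" line_lower then PySem.Set.add terms "Vue" else terms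
  terms

-- what one line contributes
def addsA (language line a : String) : Prop :=
  (condStatus line = true ∧ a ∈ qaStatusCodes) ∨
  (condMeth line = true ∧ a ∈ qaMethodsUpper) ∨
  (condExc language line = true ∧ a ∈ qaExceptions) ∨
  (PySem.Str.isIn "fastapi" (PySem.Str.lower line) = true ∧ a = "FastAPI") ∨
  (PySem.Str.isIn "django" (PySem.Str.lower line) = true ∧ a = "Django") ∨
  (PySem.Str.isIn "flask" (PySem.Str.lower line) = true ∧ a = "Flask") ∨
  (PySem.Str.isIn "react" (PySem.Str.lower line) = true ∧ a = "React") ∨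
  (PySem.Str.isIn "vue" (PySem.Str.lower line) = true ∧ a = "Vue")

lemma mem_ite_update (c : Prop) [Decidable c] (s : PySem.Set String) (xs : List String)
    (a : String) : a ∈ (if c then PySem.Set.update s xs else s) ↔ a ∈ s ∨ (c ∧ a ∈ xs) := by
  split_ifs with h <;> simp [PySem.Set.mem_update, h]

lemma mem_ite_add (c : Prop) [Decidable c] (s : PySem.Set String) (x a : String) :
    a ∈ (if c then PySem.Set.add s x else s) ↔ a ∈ s ∨ (c ∧ a = x) := by
  split_ifs with h <;> simp [PySem.Set.mem_add, h]

lemma nodup_ite_update (c : Prop) [Decidable c] (s : PySem.Set String) (xs : List String)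
    (hs : s.Nodup) : List.Nodup (if c then PySem.Set.update s xs else s) := by
  split_ifs
  · exact PySem.Set.nodup_update s xs hs
  · exact hs

lemma nodup_ite_add (c : Prop) [Decidable c] (s : PySem.Set String) (x : String)
    (hs : s.Nodup) : List.Nodup (if c then PySem.Set.add s x else s) := by
  split_ifs
  · exact PySem.Set.nodup_add s x hs
  · exact hs

set_option maxHeartbeats 1000000 in
lemma mem_stepA (language line : String) (s : PySem.Set String) (a : String) :
    a ∈ stepA language s line ↔ a ∈ s ∨ addsA language line a := by
  simp only [stepA, mem_ite_update, mem_ite_add, addsA, condStatus, condMeth, condExc, or_assoc]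

lemma nodup_stepA (language line : String) (s : PySem.Set String) (hs : s.Nodup) :
    (stepA language s line).Nodup := by
  unfold stepA
  exact nodup_ite_add _ _ _ (nodup_ite_add _ _ _ (nodup_ite_add _ _ _ (nodup_ite_add _ _ _
    (nodup_ite_add _ _ _ (nodup_ite_update _ _ _ (nodup_ite_update _ _ _
    (nodup_ite_update _ _ _ hs)))))))

lemma mem_foldA (language : String) (lines : List String) (s : PySem.Set String) (a : String) :
    a ∈ lines.foldl (stepA language) s ↔ a ∈ s ∨ ∃ l ∈ lines, addsA language l a := by
  induction lines generalizing s with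
  | nil => simp
  | cons x xs ih =>
    rw [List.foldl_cons, ih, mem_stepA]
    simp only [List.mem_cons]
    constructor
    · rintro ((h | h) | ⟨l, hl, h⟩)
      · exact Or.inl h
      · exact Or.inr ⟨x, Or.inl rfl, h⟩
      · exact Or.inr ⟨l, Or.inr hl, h⟩
    · rintro (h | ⟨l, hl | hl, h⟩)
      · exact Or.inl (Or.inl h)
      · exact Or.inl (Or.inr (hl ▸ h))
      · exact Or.inr ⟨l, hl, h⟩

lemma nodup_foldA (language : String) (lines : List String) (s : PySem.Set String)
    (hs : s.Nodup) : (lines.foldl (stepA language) s).Nodup := by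
  induction lines generalizing s with
  | nil => exact hs
  | cons x xs ih => exact ih _ (nodup_stepA language x s hs)

-- B's term set, named
def termsB (code language : String) : PySem.Set String :=
  let lc := PySem.Str.lower code
  let terms : PySem.Set String := PySem.Set.empty
  let terms := if qaMethodsLower.any (fun m => PySem.Str.isIn m lc)
               then PySem.Set.update terms qaMethodsUpper else terms
  let terms := if language == "python" && qaExceptions.any (fun e => PySem.Str.isIn e code)
               then PySem.Set.update terms qaExceptions else terms
  let terms := qaFrameworks.foldl (fun terms p =>
      if PySem.Str.isIn p.2 lc then PySem.Set.add terms p.1 else terms) terms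
  let terms := if ((PySem.Str.split? code "\n").getD []).any (fun line =>
                    PySem.Str.isIn "status" (PySem.Str.lower line)
                    && qaStatusCodes.any (fun c => PySem.Str.isIn c line))
               then PySem.Set.update terms qaStatusCodes else terms
  terms

set_option maxHeartbeats 1000000 in
lemma mem_termsB (code language a : String) :
    a ∈ termsB code language ↔
      ((qaMethodsLower.any (fun m => PySem.Str.isIn m (PySem.Str.lower code))) = true
          ∧ a ∈ qaMethodsUpper) ∨
      ((language == "python" && qaExceptions.any (fun e => PySem.Str.isIn e code)) = true
          ∧ a ∈ qaExceptions) ∨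
      (PySem.Str.isIn "fastapi" (PySem.Str.lower code) = true ∧ a = "FastAPI") ∨
      (PySem.Str.isIn "django" (PySem.Str.lower code) = true ∧ a = "Django") ∨
      (PySem.Str.isIn "flask" (PySem.Str.lower code) = true ∧ a = "Flask") ∨
      (PySem.Str.isIn "react" (PySem.Str.lower code) = true ∧ a = "React") ∨
      (PySem.Str.isIn "vue" (PySem.Str.lower code) = true ∧ a = "Vue") ∨
      ((qaLines code).any condStatus = true ∧ a ∈ qaStatusCodes) := by
  simp only [termsB, qaFrameworks, List.foldl_cons, List.foldl_nil]
  simp only [mem_ite_update, mem_ite_add, qaLines, or_assoc]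
  simp only [PySem.Set.empty_eq, List.not_mem_nil, false_or]
  rfl

set_option maxHeartbeats 1000000 in
lemma nodup_termsB (code language : String) : (termsB code language).Nodup := by
  unfold termsB
  simp only [qaFrameworks, List.foldl_cons, List.foldl_nil]
  exact nodup_ite_update _ _ _ (nodup_ite_add _ _ _ (nodup_ite_add _ _ _ (nodup_ite_add _ _ _
    (nodup_ite_add _ _ _ (nodup_ite_add _ _ _ (nodup_ite_update _ _ _
    (nodup_ite_update _ _ _ (by rw [PySem.Set.empty_eq]; exact List.nodup_nil))))))))

-- pull a constant conjunct / a disjunction out of a bounded ∃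
lemma bex_or (L : List String) (p q : String → Prop) :
    (∃ l ∈ L, p l ∨ q l) ↔ (∃ l ∈ L, p l) ∨ (∃ l ∈ L, q l) := by aesop

lemma bex_and_const (L : List String) (p : String → Prop) (A : Prop) :
    (∃ l ∈ L, p l ∧ A) ↔ (∃ l ∈ L, p l) ∧ A := by aesop

lemma qaMethodsLower_no_nl : ∀ m ∈ qaMethodsLower, '\n' ∉ m.toList := by decide
lemma qaExceptions_no_nl : ∀ e ∈ qaExceptions, '\n' ∉ e.toList := by decide

lemma meth_bridge (code : String) :
    (∃ l ∈ qaLines code, condMeth l = true)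
      ↔ qaMethodsLower.any (fun m => PySem.Str.isIn m (PySem.Str.lower code)) = true := by
  simp only [condMeth, List.any_eq_true]
  constructor
  · rintro ⟨l, hl, m, hm, hi⟩
    exact ⟨m, hm, (isIn_lower_line_iff m code (qaMethodsLower_no_nl m hm)).mpr ⟨l, hl, hi⟩⟩
  · rintro ⟨m, hm, hi⟩
    obtain ⟨l, hl, hi'⟩ := (isIn_lower_line_iff m code (qaMethodsLower_no_nl m hm)).mp hi
    exact ⟨l, hl, m, hm, hi'⟩

lemma exc_bridge (code language : String) :
    (∃ l ∈ qaLines code, condExc language l = true)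
      ↔ (language == "python" && qaExceptions.any (fun e => PySem.Str.isIn e code)) = true := by
  simp only [condExc, Bool.and_eq_true, List.any_eq_true]
  constructor
  · rintro ⟨l, hl, hlang, e, he, hi⟩
    exact ⟨hlang, e, he, (isIn_line_iff e code (qaExceptions_no_nl e he)).mpr ⟨l, hl, hi⟩⟩
  · rintro ⟨hlang, e, he, hi⟩
    obtain ⟨l, hl, hi'⟩ := (isIn_line_iff e code (qaExceptions_no_nl e he)).mp hi
    exact ⟨l, hl, hlang, e, he, hi'⟩

lemma fw_bridge (key code : String) (hn : '\n' ∉ key.toList) :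
    (∃ l ∈ qaLines code, PySem.Str.isIn key (PySem.Str.lower l) = true)
      ↔ PySem.Str.isIn key (PySem.Str.lower code) = true :=
  (isIn_lower_line_iff key code hn).symm

-- the two term sets contain the same strings
set_option maxHeartbeats 1000000 in
lemma mem_main (code language a : String) :
    a ∈ (qaLines code).foldl (stepA language) PySem.Set.empty ↔ a ∈ termsB code language := by
  rw [mem_foldA, mem_termsB]
  simp only [PySem.Set.empty_eq, List.not_mem_nil, false_or]
  simp only [addsA, bex_or, bex_and_const]
  rw [meth_bridge, exc_bridge,
      fw_bridge "fastapi" code (by decide), fw_bridge "django" code (by decide),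
      fw_bridge "flask" code (by decide), fw_bridge "react" code (by decide),
      fw_bridge "vue" code (by decide), show ((∃ l ∈ qaLines code, condStatus l = true)
        ↔ (qaLines code).any condStatus = true) from (List.any_eq_true).symm]
  constructor
  · rintro (h | h | h | h | h | h | h | h)
    · exact Or.inr (Or.inr (Or.inr (Or.inr (Or.inr (Or.inr (Or.inr h))))))
    · exact Or.inl h
    · exact Or.inr (Or.inl h)
    · exact Or.inr (Or.inr (Or.inl h))
    · exact Or.inr (Or.inr (Or.inr (Or.inl h)))
    · exact Or.inr (Or.inr (Or.inr (Or.inr (Or.inl h))))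
    · exact Or.inr (Or.inr (Or.inr (Or.inr (Or.inr (Or.inl h)))))
    · exact Or.inr (Or.inr (Or.inr (Or.inr (Or.inr (Or.inr (Or.inl h))))))
  · rintro (h | h | h | h | h | h | h | h)
    · exact Or.inr (Or.inl h)
    · exact Or.inr (Or.inr (Or.inl h))
    · exact Or.inr (Or.inr (Or.inr (Or.inl h)))
    · exact Or.inr (Or.inr (Or.inr (Or.inr (Or.inl h))))
    · exact Or.inr (Or.inr (Or.inr (Or.inr (Or.inr (Or.inl h)))))
    · exact Or.inr (Or.inr (Or.inr (Or.inr (Or.inr (Or.inr (Or.inl h))))))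
    · exact Or.inr (Or.inr (Or.inr (Or.inr (Or.inr (Or.inr (Or.inr h))))))
    · exact Or.inl h

-- ===== VERDICT (by name: the statement is the Claim_ definition above) =====
set_option maxHeartbeats 1000000 in
theorem generate_qa_terms_spec : Claim_equal_generate_qa_terms := by
  intro code language _
  show generate_qa_terms code language = generate_qa_terms_alt code language
  have hA : generate_qa_terms code language
      = PySem.Str.join ", " (PySem.List.slice (PySem.List.sorted
          ((qaLines code).foldl (stepA language) PySem.Set.empty) (fun t => t) false)
          none (some 12)) := rfl
  have hB : generate_qa_terms_alt code language
      = PySem.Str.join ", " (PySem.List.slice (PySem.List.sorted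
          (termsB code language) (fun t => t) false) none (some 12)) := rfl
  rw [hA, hB]
  have hperm : ((qaLines code).foldl (stepA language) PySem.Set.empty).Perm
      (termsB code language) :=
    (List.perm_ext_iff_of_nodup
      (nodup_foldA language (qaLines code) _ (by rw [PySem.Set.empty_eq]; exact List.nodup_nil))
      (nodup_termsB code language)).mpr (fun a => mem_main code language a)
  rw [PySem.List.sorted_eq_sorted_of_perm _ _ _ (fun a b h => h) hperm]
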